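-- pv_equiv track=rewrite | github.com/this-guy-git/guython-vscode | interpreter/guython/core/interpreter.py | _strip_comments
-- ===== SOURCE A (Python) =====
-- def _strip_comments(line: str) -> str:
--     """Remove comments from a line"""
--     result = ''
--     i = 0
--     while i < len(line):
--         if line[i] == '{':
--             end = line.find('}', i + 1)
--             if end != -1:
--                 i = end + 1
--             else:
--                 break
--         else:
--             result += line[i]
--             i += 1
--     return result.strip()
-- ===== SOURCE B (Python) =====
-- def _strip_comments(line: str) -> str:
--     """Remove comments from a line"""
--     def go(s: str) -> str:
--         b = s.find('{')
--         if b == -1: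
--             return s
--         e = s.find('}', b + 1)
--         if e == -1:
--             return s[:b]
--         return s[:b] + go(s[e + 1:])
--     return go(line).strip()
-- ===== Notes on version B (the rewrite author's own statement) =====
-- stated objective: faster
-- what changed: Replaces the per-character index loop that appends kept characters one by one with a recursive slice-based decomposition: find the next opening brace, keep the slice before it, skip past the comment, and recurse on the remaining suffix.
import Mathlib
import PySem

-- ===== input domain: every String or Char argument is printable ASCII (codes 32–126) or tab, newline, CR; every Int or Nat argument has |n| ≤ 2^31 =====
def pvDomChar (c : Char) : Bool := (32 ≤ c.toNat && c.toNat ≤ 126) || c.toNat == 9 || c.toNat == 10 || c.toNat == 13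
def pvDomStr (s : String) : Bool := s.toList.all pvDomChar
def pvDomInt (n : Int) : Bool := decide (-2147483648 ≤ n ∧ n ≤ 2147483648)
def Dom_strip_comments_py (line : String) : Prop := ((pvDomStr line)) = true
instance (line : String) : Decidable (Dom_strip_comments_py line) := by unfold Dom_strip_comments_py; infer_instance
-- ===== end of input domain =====

-- B replaces A's per-character index loop (appending kept chars one by one) with a
-- recursive slice-based decomposition (find the next opening brace, keep the prefix, skip
-- the comment, recurse on the suffix); same value on every input; a timing run measured
-- B faster (C-level find/slice instead of a per-character interpreter loop).

-- ===== PORT A =====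
-- the while loop over index i, written as structural recursion on the suffix line[i:];
-- line.find('}', i+1) is ported as the first index of '}' in that suffix (exact for a
-- single-char needle: PySem.List.index? is Python's first-occurrence search, none = -1)
def stripCommentsLoopA : List Char → List Char
  | [] => []                                   -- i = len(line): loop ends
  | c :: rest =>
    if c = '{' then
      match PySem.List.index? rest '}' with
      | some k => stripCommentsLoopA (rest.drop (k + 1))   -- i = end + 1
      | none => []                             -- break
    else c :: stripCommentsLoopA rest          -- result += line[i]; i += 1
termination_by l => l.length
decreasing_by
  · simp only [List.length_drop, List.length_cons]; omega
  · simp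

def strip_comments_py (line : String) : String :=
  String.ofList (PySem.Chars.strip (stripCommentsLoopA line.toList))   -- result.strip()

-- ===== PORT B =====
-- Source B's recursive helper go(s): b = s.find('{'); e = s.find('}', b+1); recurse on s[e+1:].
-- s.find(c) is ported as PySem.List.index? (first index, none = -1); s.find('}', b+1)
-- as the first index of '}' in s[b+1:] (e = b+1+k), exact for a single-char needle.
def stripCommentsGoB (l : List Char) : List Char :=
  match hb : PySem.List.index? l '{' with
  | none => l                                  -- b == -1: return s
  | some b =>
    match PySem.List.index? (l.drop (b + 1)) '}' with
    | none => l.take b                         -- e == -1: return s[:b]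
    | some k => l.take b ++ stripCommentsGoB (l.drop (b + 1 + k + 1))  -- s[:b] + go(s[e+1:])
termination_by l.length
decreasing_by
  have : b < l.length := by
    rcases (PySem.List.index?_eq_some_iff _ _ _).1 hb with ⟨pre, suf, hl, hlen, -⟩
    subst hl; simp [← hlen]
  simp only [List.length_drop]; omega

def strip_comments_py_alt (line : String) : String :=
  String.ofList (PySem.Chars.strip (stripCommentsGoB line.toList))     -- go(line).strip()

-- ===== PRECONDITION & SPEC =====
def Spec_strip_comments_py (line : String) (out : String) : Prop := out = strip_comments_py_alt line
instance (line : String) (out : String) : Decidable (Spec_strip_comments_py line out) := by unfold Spec_strip_comments_py; infer_instance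

-- ===== CLAIM (what is proved, stated in full; the proofs are below) =====
def Claim_equal_strip_comments_py : Prop := ∀ (line : String), Dom_strip_comments_py line → Spec_strip_comments_py line (strip_comments_py line)

-- ===== LEMMAS AND PROOFS =====

-- A's loop copies every non-'{' character unchanged
theorem loopA_append (xs ys : List Char) (h : '{' ∉ xs) :
    stripCommentsLoopA (xs ++ ys) = xs ++ stripCommentsLoopA ys := by
  induction xs with
  | nil => simp
  | cons c cs ih =>
    simp only [List.mem_cons, not_or] at h
    simp [stripCommentsLoopA, Ne.symm h.1, ih h.2]

theorem loopA_no_brace (l : List Char) (h : '{' ∉ l) : stripCommentsLoopA l = l := by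
  have := loopA_append l [] h
  simpa [stripCommentsLoopA] using this

theorem loopA_eq_goB (l : List Char) : stripCommentsLoopA l = stripCommentsGoB l := by
  induction hn : l.length using Nat.strong_induction_on generalizing l with
  | _ n ih =>
  subst hn
  unfold stripCommentsGoB
  cases hb : PySem.List.index? l '{' with
  | none =>
    exact loopA_no_brace l ((PySem.List.index?_eq_none_iff _ _).1 hb)
  | some b =>
    rcases (PySem.List.index?_eq_some_iff _ _ _).1 hb with ⟨pre, suf, hl, hlen, hpre⟩
    subst hl
    have hdrop : (pre ++ '{' :: suf).drop (b + 1) = suf := by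
      rw [← hlen]; simp
    have htake : (pre ++ '{' :: suf).take b = pre := by
      rw [← hlen]; simp
    rw [loopA_append pre ('{' :: suf) hpre]
    split
    next h => exact absurd h (by simp)
    next b' h =>
    injection h with h; subst h
    rw [hdrop, htake]
    simp only [stripCommentsLoopA]
    cases hk : PySem.List.index? suf '}' with
    | none => simp
    | some k =>
      have hd2 : (pre ++ '{' :: suf).drop (b + 1 + k + 1) = suf.drop (k + 1) := by
        rw [show b + 1 + k + 1 = pre.length + (k + 1 + 1) by omega, List.drop_append]
        simp [show pre.length + (k + 1 + 1) - pre.length = k + 1 + 1 from by omega]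
      simp only [hd2, if_true]
      simp only [List.append_cancel_left_eq]
      exact ih (suf.drop (k + 1)).length (by simp; omega) _ rfl

-- ===== VERDICT (by name: the statement is the Claim_ definition above) =====
theorem strip_comments_py_spec : Claim_equal_strip_comments_py := by
  intro line _
  unfold Spec_strip_comments_py strip_comments_py strip_comments_py_alt
  rw [loopA_eq_goB]
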